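-- pv_equiv track=rewrite | github.com/dhananjay-901/Al-Based-Allocation-Engine | code.py | _are_similar_skills
-- ===== SOURCE A (Python) =====
-- def _are_similar_skills(skill1: str, skill2: str) -> bool:
--     """Check if two skills are similar using domain knowledge"""
--     skill_groups = {
--         'programming': ['python', 'java', 'javascript', 'c++', 'coding', 'programming'],
--         'data': ['data analysis', 'analytics', 'sql', 'database', 'data science'],
--         'design': ['ui/ux', 'figma', 'photoshop', 'design', 'prototyping'],
--         'marketing': ['marketing', 'social media', 'content writing', 'seo'],
--         'finance': ['finance', 'accounting', 'excel', 'financial modeling']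
--     }
--
--     skill1_lower = skill1.lower()
--     skill2_lower = skill2.lower()
--
--     for group in skill_groups.values():
--         if skill1_lower in group and skill2_lower in group:
--             return True
--     return False
-- ===== SOURCE B (Python) =====
-- def _are_similar_skills(skill1: str, skill2: str) -> bool:
--     """Check if two skills are similar using domain knowledge"""
--     skill_groups = {
--         'programming': ['python', 'java', 'javascript', 'c++', 'coding', 'programming'],
--         'data': ['data analysis', 'analytics', 'sql', 'database', 'data science'],
--         'design': ['ui/ux', 'figma', 'photoshop', 'design', 'prototyping'],
--         'marketing': ['marketing', 'social media', 'content writing', 'seo'],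
--         'finance': ['finance', 'accounting', 'excel', 'financial modeling']
--     }
--     skill_to_group = {skill: name for name, skills in skill_groups.items() for skill in skills}
--     g1 = skill_to_group.get(skill1.lower())
--     g2 = skill_to_group.get(skill2.lower())
--     return g1 is not None and g1 == g2
-- ===== Notes on version B (the rewrite author's own statement) =====
-- stated objective: idiomatic
-- what changed: Replaces the loop over groups with two list-membership tests per group by a flat skill-to-group dict built once, then a single lookup per input and a group-label comparison with a None guard.
import Mathlib
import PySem

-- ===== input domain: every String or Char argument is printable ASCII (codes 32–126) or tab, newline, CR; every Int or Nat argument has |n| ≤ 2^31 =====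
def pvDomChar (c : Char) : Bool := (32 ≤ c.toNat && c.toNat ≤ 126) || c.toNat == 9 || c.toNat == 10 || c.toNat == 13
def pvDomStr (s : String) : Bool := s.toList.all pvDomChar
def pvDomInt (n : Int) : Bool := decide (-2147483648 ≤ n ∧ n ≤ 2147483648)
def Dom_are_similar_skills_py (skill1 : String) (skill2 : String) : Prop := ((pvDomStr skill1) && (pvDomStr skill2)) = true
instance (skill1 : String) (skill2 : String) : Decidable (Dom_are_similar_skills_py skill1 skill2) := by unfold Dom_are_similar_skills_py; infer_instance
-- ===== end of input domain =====

-- B replaces A's loop over skill groups (two membership scans per group) by a flat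
-- skill→group dict built once, a single lookup per input and a label comparison (idiomatic).

-- ===== PORT A =====
def pvGroupsA : List (List String) :=
  [["python", "java", "javascript", "c++", "coding", "programming"],
   ["data analysis", "analytics", "sql", "database", "data science"],
   ["ui/ux", "figma", "photoshop", "design", "prototyping"],
   ["marketing", "social media", "content writing", "seo"],
   ["finance", "accounting", "excel", "financial modeling"]]

-- the 'for group in skill_groups.values(): if … return True' loop, early return and all
def pvLoopA (a b : String) : List (List String) → Bool
  | [] => false
  | g :: rest => if g.contains a && g.contains b then true else pvLoopA a b rest

def are_similar_skills_py (skill1 : String) (skill2 : String) : Bool :=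
  pvLoopA (PySem.Str.lower skill1) (PySem.Str.lower skill2) pvGroupsA

-- ===== PORT B =====
def pvGroupsB : List (String × List String) :=
  [("programming", ["python", "java", "javascript", "c++", "coding", "programming"]),
   ("data", ["data analysis", "analytics", "sql", "database", "data science"]),
   ("design", ["ui/ux", "figma", "photoshop", "design", "prototyping"]),
   ("marketing", ["marketing", "social media", "content writing", "seo"]),
   ("finance", ["finance", "accounting", "excel", "financial modeling"])]

-- the dict comprehension {skill: name for name, skills in skill_groups.items() for skill in skills}
def pvSkillToGroup : PySem.Dict String String :=
  pvGroupsB.foldl (fun d p => p.2.foldl (fun d s => d.insert s p.1) d) PySem.Dict.empty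

def are_similar_skills_py_alt (skill1 : String) (skill2 : String) : Bool :=
  let g1 := pvSkillToGroup.get? (PySem.Str.lower skill1)
  let g2 := pvSkillToGroup.get? (PySem.Str.lower skill2)
  g1.isSome && (g1 == g2)

-- ===== PRECONDITION & SPEC =====
def Spec_are_similar_skills_py (skill1 : String) (skill2 : String) (out : Bool) : Prop := out = are_similar_skills_py_alt skill1 skill2
instance (skill1 : String) (skill2 : String) (out : Bool) : Decidable (Spec_are_similar_skills_py skill1 skill2 out) := by unfold Spec_are_similar_skills_py; infer_instance

-- ===== CLAIM (what is proved, stated in full; the proofs are below) =====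
def Claim_equal_are_similar_skills_py : Prop := ∀ (skill1 : String) (skill2 : String), Dom_are_similar_skills_py skill1 skill2 → Spec_are_similar_skills_py skill1 skill2 (are_similar_skills_py skill1 skill2)

-- ===== LEMMAS AND PROOFS =====
lemma pvDictLit : pvSkillToGroup = PySem.Dict.mk [("python","programming"),("java","programming"),("javascript","programming"),("c++","programming"),("coding","programming"),("programming","programming"),("data analysis","data"),("analytics","data"),("sql","data"),("database","data"),("data science","data"),("ui/ux","design"),("figma","design"),("photoshop","design"),("design","design"),("prototyping","design"),("marketing","marketing"),("social media","marketing"),("content writing","marketing"),("seo","marketing"),("finance","finance"),("accounting","finance"),("excel","finance"),("financial modeling","finance")] := by decide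

lemma pvEv0 : pvSkillToGroup.get? "python" = some "programming" := by decide
lemma pvEv1 : pvSkillToGroup.get? "java" = some "programming" := by decide
lemma pvEv2 : pvSkillToGroup.get? "javascript" = some "programming" := by decide
lemma pvEv3 : pvSkillToGroup.get? "c++" = some "programming" := by decide
lemma pvEv4 : pvSkillToGroup.get? "coding" = some "programming" := by decide
lemma pvEv5 : pvSkillToGroup.get? "programming" = some "programming" := by decide
lemma pvEv6 : pvSkillToGroup.get? "data analysis" = some "data" := by decide
lemma pvEv7 : pvSkillToGroup.get? "analytics" = some "data" := by decide
lemma pvEv8 : pvSkillToGroup.get? "sql" = some "data" := by decide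
lemma pvEv9 : pvSkillToGroup.get? "database" = some "data" := by decide
lemma pvEv10 : pvSkillToGroup.get? "data science" = some "data" := by decide
lemma pvEv11 : pvSkillToGroup.get? "ui/ux" = some "design" := by decide
lemma pvEv12 : pvSkillToGroup.get? "figma" = some "design" := by decide
lemma pvEv13 : pvSkillToGroup.get? "photoshop" = some "design" := by decide
lemma pvEv14 : pvSkillToGroup.get? "design" = some "design" := by decide
lemma pvEv15 : pvSkillToGroup.get? "prototyping" = some "design" := by decide
lemma pvEv16 : pvSkillToGroup.get? "marketing" = some "marketing" := by decide
lemma pvEv17 : pvSkillToGroup.get? "social media" = some "marketing" := by decide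
lemma pvEv18 : pvSkillToGroup.get? "content writing" = some "marketing" := by decide
lemma pvEv19 : pvSkillToGroup.get? "seo" = some "marketing" := by decide
lemma pvEv20 : pvSkillToGroup.get? "finance" = some "finance" := by decide
lemma pvEv21 : pvSkillToGroup.get? "accounting" = some "finance" := by decide
lemma pvEv22 : pvSkillToGroup.get? "excel" = some "finance" := by decide
lemma pvEv23 : pvSkillToGroup.get? "financial modeling" = some "finance" := by decide

lemma pvNoneA (a : String) (h0 : ¬ a = ("python" : String)) (h1 : ¬ a = ("java" : String)) (h2 : ¬ a = ("javascript" : String)) (h3 : ¬ a = ("c++" : String)) (h4 : ¬ a = ("coding" : String)) (h5 : ¬ a = ("programming" : String)) (h6 : ¬ a = ("data analysis" : String)) (h7 : ¬ a = ("analytics" : String)) (h8 : ¬ a = ("sql" : String)) (h9 : ¬ a = ("database" : String)) (h10 : ¬ a = ("data science" : String)) (h11 : ¬ a = ("ui/ux" : String)) (h12 : ¬ a = ("figma" : String)) (h13 : ¬ a = ("photoshop" : String)) (h14 : ¬ a = ("design" : String)) (h15 : ¬ a = ("prototyping" : String)) (h16 : ¬ a = ("marketing" : String)) (h17 : ¬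 a = ("social media" : String)) (h18 : ¬ a = ("content writing" : String)) (h19 : ¬ a = ("seo" : String)) (h20 : ¬ a = ("finance" : String)) (h21 : ¬ a = ("accounting" : String)) (h22 : ¬ a = ("excel" : String)) (h23 : ¬ a = ("financial modeling" : String)) : pvSkillToGroup.get? a = none := by
  rw [pvDictLit]
  simp [PySem.Dict.get?_mk_cons, PySem.Dict.get?, h0, h1, h2, h3, h4, h5, h6, h7, h8]
  exact ⟨fun h => h0 h.symm, fun h => h1 h.symm, fun h => h2 h.symm, fun h => h3 h.symm, fun h => h4 h.symm, fun h => h5 h.symm, fun h => h6 h.symm, fun h => h7 h.symm, fun h => h8 h.symm, fun h => h9 h.symm, fun h => h10 h.symm, fun h => h11 h.symm, fun h => h12 h.symm, fun h => h13 h.symm, fun h => h14 h.symm, fun h => h15 h.symm, fun h => h16 h.symm, fun h => h17 h.symm, fun h => h18 h.symm, fun h => h19 h.symm, fun h => h20 h.symm, fun h => h21 h.symm, fun h => h22 h.symm, fun h => h23 h.symm⟩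

set_option maxHeartbeats 1000000 in
set_option maxRecDepth 10000 in
lemma pvMem0 (a : String) : (["python", "java", "javascript", "c++", "coding", "programming"] : List String).contains a = (pvSkillToGroup.get? a == some "programming") := by
  by_cases h0 : a = ("python" : String)
  · subst h0; decide
  by_cases h1 : a = ("java" : String)
  · subst h1; decide
  by_cases h2 : a = ("javascript" : String)
  · subst h2; decide
  by_cases h3 : a = ("c++" : String)
  · subst h3; decide
  by_cases h4 : a = ("coding" : String)
  · subst h4; decide
  by_cases h5 : a = ("programming" : String)
  · subst h5; decide
  by_cases h6 : a = ("data analysis" : String)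
  · subst h6; decide
  by_cases h7 : a = ("analytics" : String)
  · subst h7; decide
  by_cases h8 : a = ("sql" : String)
  · subst h8; decide
  by_cases h9 : a = ("database" : String)
  · subst h9; decide
  by_cases h10 : a = ("data science" : String)
  · subst h10; decide
  by_cases h11 : a = ("ui/ux" : String)
  · subst h11; decide
  by_cases h12 : a = ("figma" : String)
  · subst h12; decide
  by_cases h13 : a = ("photoshop" : String)
  · subst h13; decide
  by_cases h14 : a = ("design" : String)
  · subst h14; decide
  by_cases h15 : a = ("prototyping" : String)
  · subst h15; decide
  by_cases h16 : a = ("marketing" : String)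
  · subst h16; decide
  by_cases h17 : a = ("social media" : String)
  · subst h17; decide
  by_cases h18 : a = ("content writing" : String)
  · subst h18; decide
  by_cases h19 : a = ("seo" : String)
  · subst h19; decide
  by_cases h20 : a = ("finance" : String)
  · subst h20; decide
  by_cases h21 : a = ("accounting" : String)
  · subst h21; decide
  by_cases h22 : a = ("excel" : String)
  · subst h22; decide
  by_cases h23 : a = ("financial modeling" : String)
  · subst h23; decide
  rw [pvNoneA a h0 h1 h2 h3 h4 h5 h6 h7 h8 h9 h10 h11 h12 h13 h14 h15 h16 h17 h18 h19 h20 h21 h22 h23]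
  simp [List.contains_eq_mem, h0, h1, h2, h3, h4, h5]

set_option maxHeartbeats 1000000 in
set_option maxRecDepth 10000 in
lemma pvMem1 (a : String) : (["data analysis", "analytics", "sql", "database", "data science"] : List String).contains a = (pvSkillToGroup.get? a == some "data") := by
  by_cases h0 : a = ("python" : String)
  · subst h0; decide
  by_cases h1 : a = ("java" : String)
  · subst h1; decide
  by_cases h2 : a = ("javascript" : String)
  · subst h2; decide
  by_cases h3 : a = ("c++" : String)
  · subst h3; decide
  by_cases h4 : a = ("coding" : String)
  · subst h4; decide
  by_cases h5 : a = ("programming" : String)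
  · subst h5; decide
  by_cases h6 : a = ("data analysis" : String)
  · subst h6; decide
  by_cases h7 : a = ("analytics" : String)
  · subst h7; decide
  by_cases h8 : a = ("sql" : String)
  · subst h8; decide
  by_cases h9 : a = ("database" : String)
  · subst h9; decide
  by_cases h10 : a = ("data science" : String)
  · subst h10; decide
  by_cases h11 : a = ("ui/ux" : String)
  · subst h11; decide
  by_cases h12 : a = ("figma" : String)
  · subst h12; decide
  by_cases h13 : a = ("photoshop" : String)
  · subst h13; decide
  by_cases h14 : a = ("design" : String)
  · subst h14; decide
  by_cases h15 : a = ("prototyping" : String)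
  · subst h15; decide
  by_cases h16 : a = ("marketing" : String)
  · subst h16; decide
  by_cases h17 : a = ("social media" : String)
  · subst h17; decide
  by_cases h18 : a = ("content writing" : String)
  · subst h18; decide
  by_cases h19 : a = ("seo" : String)
  · subst h19; decide
  by_cases h20 : a = ("finance" : String)
  · subst h20; decide
  by_cases h21 : a = ("accounting" : String)
  · subst h21; decide
  by_cases h22 : a = ("excel" : String)
  · subst h22; decide
  by_cases h23 : a = ("financial modeling" : String)
  · subst h23; decide
  rw [pvNoneA a h0 h1 h2 h3 h4 h5 h6 h7 h8 h9 h10 h11 h12 h13 h14 h15 h16 h17 h18 h19 h20 h21 h22 h23]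
  simp [List.contains_eq_mem, h6, h7, h8, h9, h10]

set_option maxHeartbeats 1000000 in
set_option maxRecDepth 10000 in
lemma pvMem2 (a : String) : (["ui/ux", "figma", "photoshop", "design", "prototyping"] : List String).contains a = (pvSkillToGroup.get? a == some "design") := by
  by_cases h0 : a = ("python" : String)
  · subst h0; decide
  by_cases h1 : a = ("java" : String)
  · subst h1; decide
  by_cases h2 : a = ("javascript" : String)
  · subst h2; decide
  by_cases h3 : a = ("c++" : String)
  · subst h3; decide
  by_cases h4 : a = ("coding" : String)
  · subst h4; decide
  by_cases h5 : a = ("programming" : String)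
  · subst h5; decide
  by_cases h6 : a = ("data analysis" : String)
  · subst h6; decide
  by_cases h7 : a = ("analytics" : String)
  · subst h7; decide
  by_cases h8 : a = ("sql" : String)
  · subst h8; decide
  by_cases h9 : a = ("database" : String)
  · subst h9; decide
  by_cases h10 : a = ("data science" : String)
  · subst h10; decide
  by_cases h11 : a = ("ui/ux" : String)
  · subst h11; decide
  by_cases h12 : a = ("figma" : String)
  · subst h12; decide
  by_cases h13 : a = ("photoshop" : String)
  · subst h13; decide
  by_cases h14 : a = ("design" : String)
  · subst h14; decide
  by_cases h15 : a = ("prototyping" : String)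
  · subst h15; decide
  by_cases h16 : a = ("marketing" : String)
  · subst h16; decide
  by_cases h17 : a = ("social media" : String)
  · subst h17; decide
  by_cases h18 : a = ("content writing" : String)
  · subst h18; decide
  by_cases h19 : a = ("seo" : String)
  · subst h19; decide
  by_cases h20 : a = ("finance" : String)
  · subst h20; decide
  by_cases h21 : a = ("accounting" : String)
  · subst h21; decide
  by_cases h22 : a = ("excel" : String)
  · subst h22; decide
  by_cases h23 : a = ("financial modeling" : String)
  · subst h23; decide
  rw [pvNoneA a h0 h1 h2 h3 h4 h5 h6 h7 h8 h9 h10 h11 h12 h13 h14 h15 h16 h17 h18 h19 h20 h21 h22 h23]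
  simp [List.contains_eq_mem, h11, h12, h13, h14, h15]

set_option maxHeartbeats 1000000 in
set_option maxRecDepth 10000 in
lemma pvMem3 (a : String) : (["marketing", "social media", "content writing", "seo"] : List String).contains a = (pvSkillToGroup.get? a == some "marketing") := by
  by_cases h0 : a = ("python" : String)
  · subst h0; decide
  by_cases h1 : a = ("java" : String)
  · subst h1; decide
  by_cases h2 : a = ("javascript" : String)
  · subst h2; decide
  by_cases h3 : a = ("c++" : String)
  · subst h3; decide
  by_cases h4 : a = ("coding" : String)
  · subst h4; decide
  by_cases h5 : a = ("programming" : String)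
  · subst h5; decide
  by_cases h6 : a = ("data analysis" : String)
  · subst h6; decide
  by_cases h7 : a = ("analytics" : String)
  · subst h7; decide
  by_cases h8 : a = ("sql" : String)
  · subst h8; decide
  by_cases h9 : a = ("database" : String)
  · subst h9; decide
  by_cases h10 : a = ("data science" : String)
  · subst h10; decide
  by_cases h11 : a = ("ui/ux" : String)
  · subst h11; decide
  by_cases h12 : a = ("figma" : String)
  · subst h12; decide
  by_cases h13 : a = ("photoshop" : String)
  · subst h13; decide
  by_cases h14 : a = ("design" : String)
  · subst h14; decide
  by_cases h15 : a = ("prototyping" : String)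
  · subst h15; decide
  by_cases h16 : a = ("marketing" : String)
  · subst h16; decide
  by_cases h17 : a = ("social media" : String)
  · subst h17; decide
  by_cases h18 : a = ("content writing" : String)
  · subst h18; decide
  by_cases h19 : a = ("seo" : String)
  · subst h19; decide
  by_cases h20 : a = ("finance" : String)
  · subst h20; decide
  by_cases h21 : a = ("accounting" : String)
  · subst h21; decide
  by_cases h22 : a = ("excel" : String)
  · subst h22; decide
  by_cases h23 : a = ("financial modeling" : String)
  · subst h23; decide
  rw [pvNoneA a h0 h1 h2 h3 h4 h5 h6 h7 h8 h9 h10 h11 h12 h13 h14 h15 h16 h17 h18 h19 h20 h21 h22 h23]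
  simp [List.contains_eq_mem, h16, h17, h18, h19]

set_option maxHeartbeats 1000000 in
set_option maxRecDepth 10000 in
lemma pvMem4 (a : String) : (["finance", "accounting", "excel", "financial modeling"] : List String).contains a = (pvSkillToGroup.get? a == some "finance") := by
  by_cases h0 : a = ("python" : String)
  · subst h0; decide
  by_cases h1 : a = ("java" : String)
  · subst h1; decide
  by_cases h2 : a = ("javascript" : String)
  · subst h2; decide
  by_cases h3 : a = ("c++" : String)
  · subst h3; decide
  by_cases h4 : a = ("coding" : String)
  · subst h4; decide
  by_cases h5 : a = ("programming" : String)
  · subst h5; decide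
  by_cases h6 : a = ("data analysis" : String)
  · subst h6; decide
  by_cases h7 : a = ("analytics" : String)
  · subst h7; decide
  by_cases h8 : a = ("sql" : String)
  · subst h8; decide
  by_cases h9 : a = ("database" : String)
  · subst h9; decide
  by_cases h10 : a = ("data science" : String)
  · subst h10; decide
  by_cases h11 : a = ("ui/ux" : String)
  · subst h11; decide
  by_cases h12 : a = ("figma" : String)
  · subst h12; decide
  by_cases h13 : a = ("photoshop" : String)
  · subst h13; decide
  by_cases h14 : a = ("design" : String)
  · subst h14; decide
  by_cases h15 : a = ("prototyping" : String)
  · subst h15; decide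
  by_cases h16 : a = ("marketing" : String)
  · subst h16; decide
  by_cases h17 : a = ("social media" : String)
  · subst h17; decide
  by_cases h18 : a = ("content writing" : String)
  · subst h18; decide
  by_cases h19 : a = ("seo" : String)
  · subst h19; decide
  by_cases h20 : a = ("finance" : String)
  · subst h20; decide
  by_cases h21 : a = ("accounting" : String)
  · subst h21; decide
  by_cases h22 : a = ("excel" : String)
  · subst h22; decide
  by_cases h23 : a = ("financial modeling" : String)
  · subst h23; decide
  rw [pvNoneA a h0 h1 h2 h3 h4 h5 h6 h7 h8 h9 h10 h11 h12 h13 h14 h15 h16 h17 h18 h19 h20 h21 h22 h23]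
  simp [List.contains_eq_mem, h20, h21, h22, h23]

set_option maxHeartbeats 1000000 in
set_option maxRecDepth 10000 in
lemma pvRange (a : String) (x : String) (h : pvSkillToGroup.get? a = some x) : x = "programming" ∨ x = "data" ∨ x = "design" ∨ x = "marketing" ∨ x = "finance" := by
  by_cases h0 : a = ("python" : String)
  · subst h0; rw [pvEv0] at h; cases h; simp
  by_cases h1 : a = ("java" : String)
  · subst h1; rw [pvEv1] at h; cases h; simp
  by_cases h2 : a = ("javascript" : String)
  · subst h2; rw [pvEv2] at h; cases h; simp
  by_cases h3 : a = ("c++" : String)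
  · subst h3; rw [pvEv3] at h; cases h; simp
  by_cases h4 : a = ("coding" : String)
  · subst h4; rw [pvEv4] at h; cases h; simp
  by_cases h5 : a = ("programming" : String)
  · subst h5; rw [pvEv5] at h; cases h; simp
  by_cases h6 : a = ("data analysis" : String)
  · subst h6; rw [pvEv6] at h; cases h; simp
  by_cases h7 : a = ("analytics" : String)
  · subst h7; rw [pvEv7] at h; cases h; simp
  by_cases h8 : a = ("sql" : String)
  · subst h8; rw [pvEv8] at h; cases h; simp
  by_cases h9 : a = ("database" : String)
  · subst h9; rw [pvEv9] at h; cases h; simp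
  by_cases h10 : a = ("data science" : String)
  · subst h10; rw [pvEv10] at h; cases h; simp
  by_cases h11 : a = ("ui/ux" : String)
  · subst h11; rw [pvEv11] at h; cases h; simp
  by_cases h12 : a = ("figma" : String)
  · subst h12; rw [pvEv12] at h; cases h; simp
  by_cases h13 : a = ("photoshop" : String)
  · subst h13; rw [pvEv13] at h; cases h; simp
  by_cases h14 : a = ("design" : String)
  · subst h14; rw [pvEv14] at h; cases h; simp
  by_cases h15 : a = ("prototyping" : String)
  · subst h15; rw [pvEv15] at h; cases h; simp
  by_cases h16 : a = ("marketing" : String)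
  · subst h16; rw [pvEv16] at h; cases h; simp
  by_cases h17 : a = ("social media" : String)
  · subst h17; rw [pvEv17] at h; cases h; simp
  by_cases h18 : a = ("content writing" : String)
  · subst h18; rw [pvEv18] at h; cases h; simp
  by_cases h19 : a = ("seo" : String)
  · subst h19; rw [pvEv19] at h; cases h; simp
  by_cases h20 : a = ("finance" : String)
  · subst h20; rw [pvEv20] at h; cases h; simp
  by_cases h21 : a = ("accounting" : String)
  · subst h21; rw [pvEv21] at h; cases h; simp
  by_cases h22 : a = ("excel" : String)
  · subst h22; rw [pvEv22] at h; cases h; simp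
  by_cases h23 : a = ("financial modeling" : String)
  · subst h23; rw [pvEv23] at h; cases h; simp
  rw [pvNoneA a h0 h1 h2 h3 h4 h5 h6 h7 h8 h9 h10 h11 h12 h13 h14 h15 h16 h17 h18 h19 h20 h21 h22 h23] at h; cases h

set_option maxHeartbeats 1000000 in
lemma pvKey (a b : String) :
    pvLoopA a b pvGroupsA =
      ((pvSkillToGroup.get? a).isSome && (pvSkillToGroup.get? a == pvSkillToGroup.get? b)) := by
  simp only [pvGroupsA, pvLoopA, pvMem0, pvMem1, pvMem2, pvMem3, pvMem4]
  rcases hga : pvSkillToGroup.get? a with _ | x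
  · simp
  · rcases pvRange a x hga with rfl | rfl | rfl | rfl | rfl <;>
    · rcases hgb : pvSkillToGroup.get? b with _ | y
      · simp
      · rcases pvRange b y hgb with rfl | rfl | rfl | rfl | rfl <;> decide

-- ===== VERDICT (by name: the statement is the Claim_ definition above) =====
theorem are_similar_skills_py_spec : Claim_equal_are_similar_skills_py := by
  intro skill1 skill2 _
  unfold Spec_are_similar_skills_py are_similar_skills_py are_similar_skills_py_alt
  exact pvKey _ _
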